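-- pv_equiv track=rewrite | github.com/lsassetmng-art/PocketSecretary | foundation-team/leader_ng_summary.py | parse_ng
-- ===== SOURCE A (Python) =====
-- ROLES = ["Java", "DB", "Security", "Test", "XML"]
--
-- def parse_ng(md):
--     result = {r: [] for r in ROLES}
--     current_target = None
--
--     for line in md.splitlines():
--         line = line.strip()
--         if line.startswith("### Review Target:"):
--             current_target = line.split(":")[1].strip()
--         elif current_target and line.startswith("-") and "ng" in line.lower():
--             result[current_target].append(line.replace("-", "").strip())
--
--     return result
-- ===== SOURCE B (Python) =====
-- ROLES = ["Java", "DB", "Security", "Test", "XML"]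
-- HEADER = "### Review Target:"
--
-- def _is_ng(line):
--     return line.startswith("-") and "ng" in line.lower()
--
-- def _sections(md):
--     """Pass 1: parse the document structure into (target, body-lines) sections."""
--     secs = []
--     for raw in md.splitlines():
--         line = raw.strip()
--         if line.startswith(HEADER):
--             secs.append((line.split(":")[1].strip(), []))
--         elif secs:
--             secs[-1][1].append(line)
--     return secs
--
-- def parse_ng(md):
--     # pass 2: collect the NG bullets per section target
--     result = {r: [] for r in ROLES}
--     for target, body in _sections(md):
--         if target:
--             for line in body:
--                 if _is_ng(line):
--                     result[target].append(line.replace("-", "").strip())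
--     return result
-- ===== Notes on version B (the rewrite author's own statement) =====
-- stated objective: alternative
-- what changed: B replaces A's single stateful line loop (current_target flag mutated in flight) by a two-phase parse: first build the document structure as a list of (target, body-lines) sections, then fold over the sections collecting NG bullets per target; unguarded result[target].append is kept, so the KeyError inputs stay outside Pre_.
import Mathlib
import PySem

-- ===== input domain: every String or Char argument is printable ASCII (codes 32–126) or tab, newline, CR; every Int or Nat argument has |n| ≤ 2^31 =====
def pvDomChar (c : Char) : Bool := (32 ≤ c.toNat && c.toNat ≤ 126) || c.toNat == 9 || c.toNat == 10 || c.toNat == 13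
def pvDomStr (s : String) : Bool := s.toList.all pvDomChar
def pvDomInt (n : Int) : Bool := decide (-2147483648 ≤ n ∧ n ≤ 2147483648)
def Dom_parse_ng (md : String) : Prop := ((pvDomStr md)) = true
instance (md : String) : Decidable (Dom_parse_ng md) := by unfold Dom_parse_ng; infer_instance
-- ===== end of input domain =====

-- B re-implements the same extraction as a two-phase parse (build a (target, body) section
-- list first, then collect NG bullets per section); equivalence is about the RETURN value.

-- ===== PORT A =====
def pvROLES : List String := ["Java", "DB", "Security", "Test", "XML"]

def pvIsHeader (ln : String) : Bool := PySem.Str.startswith ln "### Review Target:"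

-- line.split(":")[1].strip(); only applied to header lines, which contain ':', so the
-- IndexError branch of Python's [1] is unreachable (getD default never used)
def pvTarget (ln : String) : String :=
  PySem.Str.strip (((PySem.Str.split? ln ":").getD []).getD 1 "")

def pvIsNG (ln : String) : Bool :=
  PySem.Str.startswith ln "-" && PySem.Str.isIn "ng" (PySem.Str.lower ln)

def pvClean (ln : String) : String := PySem.Str.strip (PySem.Str.replace ln "-" "")

def pvInit : PySem.Dict String (List String) :=
  PySem.Dict.ofList (pvROLES.map (fun r => (r, [])))

-- result[t].append(x): Python raises KeyError when t is absent (excluded by Pre_);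
-- the port leaves the dict unchanged there
def pvAppendOne (d : PySem.Dict String (List String)) (t : String) (ln : String) :
    PySem.Dict String (List String) :=
  match d.get? t with
  | some l => d.insert t (l ++ [pvClean ln])
  | none => d

-- A's loop body on the already-stripped line, state = (result, current_target);
-- current_target = "" plays Python's falsy None/"" role
def pvAStep (st : PySem.Dict String (List String) × String) (line : String) :
    PySem.Dict String (List String) × String :=
  if pvIsHeader line then (st.1, pvTarget line)
  else if st.2 ≠ "" ∧ pvIsNG line then (pvAppendOne st.1 st.2 line, st.2)
  else st

def parse_ng (md : String) : List (String × List String) :=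
  ((PySem.Str.splitlines md).foldl
      (fun st raw => pvAStep st (PySem.Str.strip raw)) (pvInit, "")).1.items

-- ===== PORT B =====
-- sections[-1][1].append(line) (no-op when sections is empty, like Python's 'elif sections:')
def pvAppendLast : List (String × List String) → String → List (String × List String)
  | [], _ => []
  | [(t, b)], ln => [(t, b ++ [ln])]
  | s :: rest, ln => s :: pvAppendLast rest ln

def pvSecStep (secs : List (String × List String)) (line : String) :
    List (String × List String) :=
  if pvIsHeader line then secs ++ [(pvTarget line, [])]
  else pvAppendLast secs line

def pvSections (lines : List String) : List (String × List String) :=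
  lines.foldl pvSecStep []

def pvProcBody (d : PySem.Dict String (List String)) (t : String) (body : List String) :
    PySem.Dict String (List String) :=
  body.foldl (fun d ln => if pvIsNG ln then pvAppendOne d t ln else d) d

def pvProc (d : PySem.Dict String (List String)) (secs : List (String × List String)) :
    PySem.Dict String (List String) :=
  secs.foldl (fun d s => if s.1 ≠ "" then pvProcBody d s.1 s.2 else d) d

def parse_ng_alt (md : String) : List (String × List String) :=
  (pvProc pvInit (pvSections ((PySem.Str.splitlines md).map PySem.Str.strip))).items

-- ===== PRECONDITION & SPEC =====
-- Pre_ excludes exactly the inputs where Python A raises KeyError: an NG bullet line lying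
-- under a header whose (truthy) target is not one of the five ROLES keys; B raises there too.
def pvNoBadNG : String → List String → Bool
  | _, [] => true
  | t, ln :: rest =>
    if pvIsHeader ln then pvNoBadNG (pvTarget ln) rest
    else if t ≠ "" ∧ pvIsNG ln ∧ ¬ (t ∈ pvROLES) then false
    else pvNoBadNG t rest

def Pre_parse_ng (md : String) : Prop :=
  pvNoBadNG "" ((PySem.Str.splitlines md).map PySem.Str.strip) = true
instance (md : String) : Decidable (Pre_parse_ng md) := by unfold Pre_parse_ng; infer_instance

def pvWitness_parse_ng : String :=
  "intro\n### Review Target: Java\n- ng null check\n- fine\n### Review Target: DB\n  - NG index -\n"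

def Spec_parse_ng (md : String) (out : List (String × List String)) : Prop := out = parse_ng_alt md
instance (md : String) (out : List (String × List String)) : Decidable (Spec_parse_ng md out) := by unfold Spec_parse_ng; infer_instance

-- ===== CLAIM (what is proved, stated in full; the proofs are below) =====
def Claim_equal_parse_ng : Prop := ∀ (md : String), Dom_parse_ng md → Pre_parse_ng md → Spec_parse_ng md (parse_ng md)

-- ===== LEMMAS AND PROOFS =====

-- recursive characterisation of the section list (proof-side helper; head of each chunk is a header)
def pvSectionsR : List String → List (String × List String)
  | [] => []
  | ln :: rest =>
      (pvTarget ln, rest.takeWhile (fun l => !pvIsHeader l)) ::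
        pvSectionsR (rest.dropWhile (fun l => !pvIsHeader l))
termination_by lines => lines.length
decreasing_by
  exact Nat.lt_succ_of_le (List.length_dropWhile_le _ _)

lemma pvAppendLast_append (acc : List (String × List String)) (t : String)
    (b : List String) (ln : String) :
    pvAppendLast (acc ++ [(t, b)]) ln = acc ++ [(t, b ++ [ln])] := by
  induction acc with
  | nil => rfl
  | cons s rest ih =>
      cases rest with
      | nil => cases s; rfl
      | cons s' rest' => simpa [pvAppendLast] using ih

lemma pvSections_open (lines : List String) :
    ∀ (acc : List (String × List String)) (t : String) (b : List String),
    lines.foldl pvSecStep (acc ++ [(t, b)]) =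
      acc ++ ((t, b ++ lines.takeWhile (fun l => !pvIsHeader l)) ::
        pvSectionsR (lines.dropWhile (fun l => !pvIsHeader l))) := by
  induction lines with
  | nil => intro acc t b; simp [pvSectionsR]
  | cons ln rest ih =>
      intro acc t b
      by_cases h : pvIsHeader ln = true
      · have step : pvSecStep (acc ++ [(t, b)]) ln
            = (acc ++ [(t, b)]) ++ [(pvTarget ln, [])] := by
          simp [pvSecStep, h]
        rw [List.foldl_cons, step, ih (acc ++ [(t, b)]) (pvTarget ln) []]
        simp [h, pvSectionsR]
      · have step : pvSecStep (acc ++ [(t, b)]) ln = acc ++ [(t, b ++ [ln])] := by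
          simp [pvSecStep, h, pvAppendLast_append]
        rw [List.foldl_cons, step, ih acc t (b ++ [ln])]
        simp [h]
  
lemma pvSections_eq (lines : List String) :
    pvSections lines = pvSectionsR (lines.dropWhile (fun l => !pvIsHeader l)) := by
  induction lines with
  | nil => simp [pvSections, pvSectionsR]
  | cons ln rest ih =>
      by_cases h : pvIsHeader ln = true
      · have step : pvSecStep [] ln = [] ++ [(pvTarget ln, [])] := by
          simp [pvSecStep, h]
        simp only [pvSections, List.foldl_cons, step]
        rw [pvSections_open rest [] (pvTarget ln) []]
        simp [h, pvSectionsR]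
      · have step : pvSecStep [] ln = [] := by simp [pvSecStep, h, pvAppendLast]
        simp only [pvSections, List.foldl_cons, step, List.dropWhile_cons, h]
        simpa [pvSections] using ih

-- A's fold written as structural recursion on the stripped line list
def pvALoop (d : PySem.Dict String (List String)) (t : String) :
    List String → PySem.Dict String (List String) × String
  | [] => (d, t)
  | ln :: rest =>
      if pvIsHeader ln then pvALoop d (pvTarget ln) rest
      else if t ≠ "" ∧ pvIsNG ln then pvALoop (pvAppendOne d t ln) t rest
      else pvALoop d t rest

lemma pvALoop_eq_foldl (lines : List String) :
    ∀ d t, lines.foldl pvAStep (d, t) = pvALoop d t lines := by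
  induction lines with
  | nil => intro d t; rfl
  | cons ln rest ih =>
      intro d t
      by_cases h : pvIsHeader ln = true
      · simp [List.foldl_cons, pvAStep, h, pvALoop, ih]
      · by_cases h2 : t ≠ "" ∧ pvIsNG ln = true
        · simp [List.foldl_cons, pvAStep, h, h2, pvALoop, ih]
        · simp only [List.foldl_cons]
          have : pvAStep (d, t) ln = (d, t) := by
            simp [pvAStep, h]
            intro ha hb
            exact absurd ⟨ha, hb⟩ h2
          rw [this, ih]
          simp [pvALoop, h, h2]

lemma pvProcBody_nil (d : PySem.Dict String (List String)) (t : String) :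
    pvProcBody d t [] = d := rfl

-- main bridge: A's recursive loop = process-the-open-section, then fold the parsed sections
lemma pvALoop_eq_proc (lines : List String) :
    ∀ d t, (pvALoop d t lines).1 =
      pvProc (if t ≠ "" then pvProcBody d t (lines.takeWhile (fun l => !pvIsHeader l)) else d)
        (pvSectionsR (lines.dropWhile (fun l => !pvIsHeader l))) := by
  induction lines with
  | nil =>
      intro d t
      by_cases h : t = "" <;> simp [pvALoop, pvProc, pvSectionsR, pvProcBody, h]
  | cons ln rest ih =>
      intro d t
      by_cases h : pvIsHeader ln = true
      · have lhs : (pvALoop d t (ln :: rest)).1 = (pvALoop d (pvTarget ln) rest).1 := by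
          simp [pvALoop, h]
        rw [lhs, ih d (pvTarget ln)]
        simp only [List.takeWhile_cons, List.dropWhile_cons, h, Bool.not_true,
          Bool.false_eq_true, ite_false, pvSectionsR]
        have rhs : pvProc (if t ≠ "" then pvProcBody d t [] else d)
            ((pvTarget ln, List.takeWhile (fun l => !pvIsHeader l) rest) ::
              pvSectionsR (List.dropWhile (fun l => !pvIsHeader l) rest))
            = pvProc (if pvTarget ln ≠ "" then
                pvProcBody d (pvTarget ln) (List.takeWhile (fun l => !pvIsHeader l) rest) else d)
              (pvSectionsR (List.dropWhile (fun l => !pvIsHeader l) rest)) := by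
          by_cases ht : t = "" <;> simp [pvProc, pvProcBody_nil, ht]
        rw [rhs]
      · have tw : List.takeWhile (fun l => !pvIsHeader l) (ln :: rest)
            = ln :: List.takeWhile (fun l => !pvIsHeader l) rest := by
          simp [h]
        have dw : List.dropWhile (fun l => !pvIsHeader l) (ln :: rest)
            = List.dropWhile (fun l => !pvIsHeader l) rest := by
          simp [h]
        rw [tw, dw]
        by_cases ht : t = ""
        · have lhs : (pvALoop d t (ln :: rest)).1 = (pvALoop d t rest).1 := by
            simp [pvALoop, h, ht]
          rw [lhs, ih d t]; simp [ht]
        · by_cases hng : pvIsNG ln = true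
          · have lhs : (pvALoop d t (ln :: rest)).1 = (pvALoop (pvAppendOne d t ln) t rest).1 := by
              simp [pvALoop, h, ht, hng]
            rw [lhs, ih (pvAppendOne d t ln) t]
            simp [ht, pvProcBody, List.foldl_cons, hng]
          · have lhs : (pvALoop d t (ln :: rest)).1 = (pvALoop d t rest).1 := by
              simp [pvALoop, h, ht, hng]
            rw [lhs, ih d t]
            simp [ht, pvProcBody, List.foldl_cons, hng]

lemma parse_ng_eq_alt (md : String) : parse_ng md = parse_ng_alt md := by
  unfold parse_ng parse_ng_alt
  rw [← List.foldl_map (f := PySem.Str.strip) (g := pvAStep)]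
  rw [pvALoop_eq_foldl, pvALoop_eq_proc, pvSections_eq]
  simp

-- ===== VERDICT (by name: the statement is the Claim_ definition above) =====
theorem parse_ng_spec : Claim_equal_parse_ng := by
  intro md _ _
  unfold Spec_parse_ng
  exact parse_ng_eq_alt md
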